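-- pv_equiv track=rewrite | github.com/MadVyang/boj | 1436.py | check
-- ===== SOURCE A (Python) =====
-- def check(n):
--
--     count = 0
--
--     while n>0:
--
--         while n%10==6:
--
--             count += 1
--
--             n//=10
--
--         if count >= 3:
--
--             return True
--
--         count = 0
--
--         n//=10
--
--     return False
-- ===== SOURCE B (Python) =====
-- def check(n):
--     return n > 0 and '666' in str(n)
-- ===== Notes on version B (the rewrite author's own statement) =====
-- stated objective: simpler
-- what changed: Replaces the nested modular digit-extraction loops and run counter with a decimal string conversion and a substring test for '666' (guarded by n > 0, matching the loop's entry condition).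
import Mathlib
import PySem

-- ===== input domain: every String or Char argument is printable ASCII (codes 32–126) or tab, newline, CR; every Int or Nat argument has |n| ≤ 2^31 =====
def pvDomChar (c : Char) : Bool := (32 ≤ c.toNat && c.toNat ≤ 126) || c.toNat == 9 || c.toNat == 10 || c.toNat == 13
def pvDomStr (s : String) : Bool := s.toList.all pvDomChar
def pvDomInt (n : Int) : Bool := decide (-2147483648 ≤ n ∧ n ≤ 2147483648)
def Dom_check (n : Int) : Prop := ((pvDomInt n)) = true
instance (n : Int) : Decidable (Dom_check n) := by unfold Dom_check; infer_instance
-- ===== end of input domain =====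

-- B replaces A's nested modular digit-extraction loops with a decimal string
-- conversion and a substring test for "666" (objective: simpler).

-- ===== PORT A =====
-- fuel only makes the recursions total: n.natAbs + 1 always exceeds the number
-- of iterations either Python while-loop performs (proved by the claim below).
-- inner `while n%10==6: count += 1; n //= 10`
def innerLoop : Nat → Int → Int → Int × Int
  | 0, n, count => (n, count)
  | fuel + 1, n, count =>
    if PySem.Int.mod n 10 = 6 then
      innerLoop fuel (PySem.Int.floordiv n 10) (count + 1)
    else (n, count)

-- outer `while n>0: <inner>; if count >= 3: return True; count = 0; n //= 10`
def outerLoop : Nat → Int → Int → Bool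
  | 0, _, _ => false
  | fuel + 1, n, count =>
    if 0 < n then
      if 3 ≤ (innerLoop (n.natAbs + 1) n count).2 then true
      else outerLoop fuel (PySem.Int.floordiv (innerLoop (n.natAbs + 1) n count).1 10) 0
    else false

def check (n : Int) : Bool := outerLoop (n.natAbs + 1) n 0

-- ===== PORT B =====
def check_alt (n : Int) : Bool :=
  decide (0 < n) && PySem.Str.isIn "666" (PySem.Int.toStr n)

-- ===== PRECONDITION & SPEC =====
def Spec_check (n : Int) (out : Bool) : Prop := out = check_alt n
instance (n : Int) (out : Bool) : Decidable (Spec_check n out) := by unfold Spec_check; infer_instance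

-- ===== CLAIM (what is proved, stated in full; the proofs are below) =====
def Claim_equal_check : Prop := ∀ (n : Int), Dom_check n → Spec_check n (check n)

-- ===== LEMMAS AND PROOFS =====

-- proof-side model of A's loop on the LSB-first digit list, carrying the run counter
def runG : List Nat → Int → Bool
  | [], c => decide (3 ≤ c)
  | d :: t, c => if d = 6 then runG t (c + 1) else (decide (3 ≤ c) || runG t 0)

-- length of the leading run of 6s
def lead6 : List Nat → Nat
  | [] => 0
  | d :: t => if d = 6 then lead6 t + 1 else 0

theorem mod_natCast' (m : Nat) : PySem.Int.mod (m : Int) 10 = ((m % 10 : Nat) : Int) := by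
  exact_mod_cast PySem.Int.mod_natCast m 10

theorem floordiv_natCast' (m : Nat) :
    PySem.Int.floordiv (m : Int) 10 = ((m / 10 : Nat) : Int) := by
  exact_mod_cast PySem.Int.floordiv_natCast m 10

theorem innerLoop_step_six (f : Nat) (m : Nat) (c : Int) (h6 : m % 10 = 6) :
    innerLoop (f + 1) (m : Int) c = innerLoop f ((m / 10 : Nat) : Int) (c + 1) := by
  have hcond : PySem.Int.mod (m : Int) 10 = 6 := by rw [mod_natCast', h6]; decide
  rw [innerLoop, if_pos hcond, floordiv_natCast']

theorem innerLoop_step_not6 (f : Nat) (m : Nat) (c : Int) (h6 : ¬ m % 10 = 6) :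
    innerLoop (f + 1) (m : Int) c = ((m : Int), c) := by
  have hcond : ¬ PySem.Int.mod (m : Int) 10 = 6 := by
    rw [mod_natCast']
    intro hx
    exact h6 (by exact_mod_cast hx)
  rw [innerLoop, if_neg hcond]

-- the inner loop's value does not depend on the fuel, as long as fuel > m
theorem innerLoop_fuel : ∀ m : Nat, ∀ f : Nat, ∀ c : Int, m < f →
    innerLoop f (m : Int) c = innerLoop (m + 1) (m : Int) c := by
  intro m
  induction m using Nat.strong_induction_on with
  | _ m ih =>
    intro f c hf
    obtain ⟨f', rfl⟩ : ∃ f', f = f' + 1 := ⟨f - 1, by omega⟩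
    by_cases h6 : m % 10 = 6
    · have hm : 0 < m := by omega
      have hlt : m / 10 < m := Nat.div_lt_self hm (by norm_num)
      rw [innerLoop_step_six f' m c h6, innerLoop_step_six m m c h6]
      rw [ih (m / 10) hlt f' (c + 1) (by omega), ih (m / 10) hlt m (c + 1) (by omega)]
    · rw [innerLoop_step_not6 f' m c h6, innerLoop_step_not6 m m c h6]

theorem outerLoop_zero (f : Nat) : outerLoop f 0 0 = false := by
  cases f <;> simp [outerLoop]

-- A's outer-loop body on a natural number equals runG on its digit list
theorem bodyA_eq_runG : ∀ m : Nat, ∀ c : Int, ∀ fo : Nat, m ≤ fo →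
    (if 3 ≤ (innerLoop (m + 1) (m : Int) c).2 then true
     else outerLoop fo (PySem.Int.floordiv (innerLoop (m + 1) (m : Int) c).1 10) 0)
      = runG (Nat.digits 10 m) c := by
  intro m
  induction m using Nat.strong_induction_on with
  | _ m ih =>
    intro c fo hfo
    by_cases hm : m = 0
    · subst hm
      rw [innerLoop_step_not6 0 0 c (by decide)]
      have hfd : PySem.Int.floordiv ((0 : Nat) : Int) 10 = (0 : Int) := by decide
      rw [hfd, outerLoop_zero fo]
      have hrg : runG [] c = decide (3 ≤ c) := by simp [runG]
      simp only [Nat.digits_zero, hrg]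
      by_cases hc : 3 ≤ c <;> simp [hc]
    · have hm' : 0 < m := Nat.pos_of_ne_zero hm
      have hlt : m / 10 < m := Nat.div_lt_self hm' (by norm_num)
      have hdig : Nat.digits 10 m = m % 10 :: Nat.digits 10 (m / 10) :=
        Nat.digits_def' (by norm_num) hm'
      by_cases h6 : m % 10 = 6
      · rw [innerLoop_step_six m m c h6, innerLoop_fuel (m / 10) m (c + 1) (by omega)]
        have hrg : runG (m % 10 :: Nat.digits 10 (m / 10)) c
            = runG (Nat.digits 10 (m / 10)) (c + 1) := by
          simp [runG, h6]
        rw [hdig, hrg]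
        exact ih (m / 10) hlt (c + 1) fo (by omega)
      · rw [innerLoop_step_not6 m m c h6, hdig, floordiv_natCast']
        have hout : outerLoop fo ((m / 10 : Nat) : Int) 0 = runG (Nat.digits 10 (m / 10)) 0 := by
          by_cases hq : m / 10 = 0
          · rw [hq]
            rw [show (((0 : Nat)) : Int) = (0 : Int) from rfl, outerLoop_zero fo]
            simp [runG]
          · have hq' : (0 : Int) < ((m / 10 : Nat) : Int) := by
              exact_mod_cast Nat.pos_of_ne_zero hq
            obtain ⟨fo', rfl⟩ : ∃ fo', fo = fo' + 1 := ⟨fo - 1, by omega⟩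
            rw [outerLoop, if_pos hq']
            have hna : (((m / 10 : Nat) : Int)).natAbs = m / 10 := Int.natAbs_natCast _
            rw [hna, innerLoop_fuel (m / 10) (m / 10 + 1) 0 (by omega)]
            exact ih (m / 10) hlt 0 fo' (by omega)
        have hrg : runG (m % 10 :: Nat.digits 10 (m / 10)) c
            = (decide (3 ≤ c) || runG (Nat.digits 10 (m / 10)) 0) := by
          simp [runG, h6]
        rw [hrg, hout]
        by_cases hc : 3 ≤ c <;> simp [hc]

theorem check_eq_runG (m : Nat) : outerLoop (m + 1) (m : Int) 0 = runG (Nat.digits 10 m) 0 := by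
  by_cases hm : m = 0
  · subst hm
    rw [show (((0 : Nat)) : Int) = (0 : Int) from rfl, outerLoop_zero 1]
    simp [runG]
  · have hm' : (0 : Int) < (m : Int) := by exact_mod_cast Nat.pos_of_ne_zero hm
    rw [outerLoop, if_pos hm']
    have hna : ((m : Int)).natAbs = m := Int.natAbs_natCast _
    rw [hna]
    exact bodyA_eq_runG m 0 m (le_refl m)

-- a leading run of k sixes is a replicate prefix
theorem lead6_prefix_k : ∀ (l : List Nat) (k : Nat), k ≤ lead6 l → List.replicate k 6 <+: l := by
  intro l
  induction l with
  | nil =>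
    intro k hk
    simp [lead6] at hk
    simp [hk]
  | cons d t ih =>
    intro k hk
    cases k with
    | zero => simp
    | succ k =>
      by_cases hd : d = 6
      · subst hd
        simp [lead6] at hk
        rw [List.replicate_succ, List.cons_prefix_cons]
        exact ⟨rfl, ih k (by omega)⟩
      · simp [lead6, hd] at hk

theorem runG_eq (l : List Nat) : ∀ c : Int, 0 ≤ c →
    runG l c = decide (3 ≤ c + (lead6 l : Int) ∨ [6, 6, 6] <:+: l) := by
  induction l with
  | nil =>
    intro c _
    simp [runG, lead6]
  | cons d t ih =>
    intro c hc
    by_cases hd : d = 6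
    · subst hd
      have hrw : runG (6 :: t) c = runG t (c + 1) := by simp [runG]
      have hl : lead6 (6 :: t) = lead6 t + 1 := by simp [lead6]
      rw [hrw, ih (c + 1) (by omega), hl, decide_eq_decide]
      constructor
      · rintro (h | h)
        · left; push_cast at h ⊢; omega
        · right; exact List.infix_cons h
      · rintro (h | h)
        · left; push_cast at h ⊢; omega
        · rcases List.infix_cons_iff.mp h with h | h
          · left
            have h2 : [6, 6] <+: t := by
              rw [show ([6, 6, 6] : List Nat) = 6 :: [6, 6] from rfl,
                List.cons_prefix_cons] at h
              exact h.2
            have h3 : 2 ≤ lead6 t := by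
              rcases h2 with ⟨r, hr⟩
              rw [← hr]
              simp [lead6]
            omega
          · right; exact h
    · have hrw : runG (d :: t) c = (decide (3 ≤ c) || runG t 0) := by simp [runG, hd]
      have hl : lead6 (d :: t) = 0 := by simp [lead6, hd]
      rw [hrw, ih 0 (le_refl 0), hl, Bool.eq_iff_iff]
      simp only [Bool.or_eq_true, decide_eq_true_eq]
      constructor
      · rintro (h | h | h)
        · left; omega
        · right
          have h3 : 3 ≤ lead6 t := by omega
          exact List.infix_cons (lead6_prefix_k t 3 h3).isInfix
        · right; exact List.infix_cons h
      · rintro (h | h)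
        · left; omega
        · rcases List.infix_cons_iff.mp h with h | h
          · exact absurd (List.cons_prefix_cons.mp h).1.symm hd
          · right; right; exact h

theorem digitChar_eq_six (d : Nat) (hd : d < 10) : Nat.digitChar d = '6' ↔ d = 6 := by
  interval_cases d <;> decide

theorem prefix_map_digitChar : ∀ (l : List Nat), (∀ d ∈ l, d < 10) → ∀ k : Nat,
    (List.replicate k '6' <+: l.map Nat.digitChar ↔ List.replicate k 6 <+: l) := by
  intro l
  induction l with
  | nil =>
    intro _ k
    cases k <;> simp
  | cons d t ih =>
    intro hb k
    have hd : d < 10 := hb d (List.mem_cons_self)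
    have ht : ∀ x ∈ t, x < 10 := fun x hx => hb x (List.mem_cons_of_mem d hx)
    cases k with
    | zero => simp
    | succ k =>
      simp only [List.replicate_succ, List.map_cons, List.cons_prefix_cons, ih ht k]
      constructor
      · rintro ⟨h1, h2⟩
        exact ⟨((digitChar_eq_six d hd).mp h1.symm).symm, h2⟩
      · rintro ⟨h1, h2⟩
        exact ⟨((digitChar_eq_six d hd).mpr h1.symm).symm, h2⟩

theorem infix_map_digitChar (l : List Nat) (hb : ∀ d ∈ l, d < 10) :
    ['6', '6', '6'] <:+: l.map Nat.digitChar ↔ [6, 6, 6] <:+: l := by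
  induction l with
  | nil => simp
  | cons d t ih =>
    have ht : ∀ x ∈ t, x < 10 := fun x hx => hb x (List.mem_cons_of_mem d hx)
    rw [List.map_cons, List.infix_cons_iff, List.infix_cons_iff, ih ht]
    have hp : (['6', '6', '6'] : List Char) <+: Nat.digitChar d :: t.map Nat.digitChar
        ↔ ([6, 6, 6] : List Nat) <+: d :: t := by
      have h := prefix_map_digitChar (d :: t) hb 3
      simpa [List.replicate] using h
    rw [hp]

theorem toDigitsCore_eq : ∀ f m : Nat, ∀ acc : List Char, 0 < m → m < f →
    Nat.toDigitsCore 10 f m acc = ((Nat.digits 10 m).map Nat.digitChar).reverse ++ acc := by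
  intro f
  induction f with
  | zero => intro m acc _ hf; omega
  | succ f ih =>
    intro m acc hm hf
    have hdig : Nat.digits 10 m = m % 10 :: Nat.digits 10 (m / 10) :=
      Nat.digits_def' (by norm_num) hm
    by_cases hq : m / 10 = 0
    · rw [Nat.toDigitsCore, hdig, hq]
      simp
    · rw [Nat.toDigitsCore]
      rw [if_neg hq]
      rw [ih (m / 10) ((m % 10).digitChar :: acc) (Nat.pos_of_ne_zero hq) (by omega), hdig]
      simp

theorem toDigits_eq (m : Nat) (h : 0 < m) :
    Nat.toDigits 10 m = ((Nat.digits 10 m).map Nat.digitChar).reverse := by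
  rw [Nat.toDigits, toDigitsCore_eq (m + 1) m [] h (by omega), List.append_nil]

theorem infix_rev (l : List Char) :
    (['6', '6', '6'] : List Char) <:+: l.reverse ↔ (['6', '6', '6'] : List Char) <:+: l := by
  constructor
  · intro h
    exact List.reverse_infix.mp (h : (['6', '6', '6'] : List Char).reverse <:+: l.reverse)
  · intro h
    exact (List.reverse_infix.mpr h : _)

-- ===== VERDICT (by name: the statement is the Claim_ definition above) =====
theorem check_spec : Claim_equal_check := by
  intro n _
  unfold Spec_check check check_alt
  by_cases hn : 0 < n
  · obtain ⟨m, rfl⟩ : ∃ m : Nat, n = (m : Int) :=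
      ⟨n.toNat, (Int.toNat_of_nonneg (by omega)).symm⟩
    have hm : 0 < m := by exact_mod_cast hn
    have hna : ((m : Int)).natAbs = m := Int.natAbs_natCast _
    rw [hna, check_eq_runG m, runG_eq _ 0 (le_refl 0), Bool.eq_iff_iff]
    simp only [Bool.and_eq_true, decide_eq_true_eq, PySem.Str.isIn_iff_infix]
    have h666 : ("666" : String).toList = ['6', '6', '6'] := rfl
    have hchars : (PySem.Int.toStr ((m : Nat) : Int)).toList = Nat.toDigits 10 m := by
      rw [PySem.Int.toList_toStr]
      unfold PySem.Int.toChars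
      rw [if_neg (by omega : ¬((m : Int) < 0))]
      simp
    rw [h666, hchars, toDigits_eq m hm, infix_rev,
      infix_map_digitChar _ (fun d hd => Nat.digits_lt_base (by norm_num) hd)]
    constructor
    · rintro (h | h)
      · have h3 : 3 ≤ lead6 (Nat.digits 10 m) := by omega
        exact ⟨hn, (lead6_prefix_k _ 3 h3).isInfix⟩
      · exact ⟨hn, h⟩
    · rintro ⟨_, h⟩
      right
      exact h
  · obtain ⟨f, hf⟩ : ∃ f, n.natAbs + 1 = f + 1 := ⟨n.natAbs, rfl⟩
    rw [hf, outerLoop, if_neg hn]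
    simp [hn]
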